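-- pv_equiv track=rewrite | github.com/dominiksta/av-syncinator | avsyncinator/app/util.py | _match_nearest_list_items
-- ===== SOURCE A (Python) =====
-- from typing import List, Tuple
--
-- def _match_nearest_list_items(l1: List[int], l2: List[int]) -> List[int]:
--     """
--     Return a list `l3` with `length == len(l1)` where for every `i in range(0,
--     len(l1))`, `l3[i]` is the element in `l2` closest to `l1[i]`.
--     """
--     def nearest_int_in_list(value: int, l: List[int]) -> int:
--         res = l[0]
--         for i in l:
--             if abs(i - value) < abs(res - value): res = i
--         return res
--
--     l3 = []
--     for i in range(0, len(l1)):
--         l3.append(nearest_int_in_list(l1[i], l2))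
--
--     return l3
-- ===== SOURCE B (Python) =====
-- from typing import List
--
-- def _match_nearest_list_items(l1: List[int], l2: List[int]) -> List[int]:
--     """For each query in l1, the l2 element nearest to it; distance ties go to
--     the value occurring first in l2. Sort the distinct l2 values once and
--     binary-search each query instead of scanning l2 per query."""
--     if not l1:
--         return []
--     first = {}
--     for i, v in enumerate(l2):
--         if v not in first:
--             first[v] = i
--     vals = sorted(first)
--
--     def query(x: int) -> int:
--         lo, hi = 0, len(vals)
--         while lo < hi:
--             mid = (lo + hi) // 2
--             if vals[mid] < x:
--                 lo = mid + 1
--             else: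
--                 hi = mid
--         if lo == len(vals):
--             return vals[-1]
--         if lo == 0:
--             return vals[0]
--         hi_v, lo_v = vals[lo], vals[lo - 1]
--         dl, dh = x - lo_v, hi_v - x
--         if dl < dh:
--             return lo_v
--         if dh < dl:
--             return hi_v
--         return lo_v if first[lo_v] < first[hi_v] else hi_v
--
--     return [query(x) for x in l1]
-- ===== Notes on version B (the rewrite author's own statement) =====
-- stated objective: faster
-- what changed: B builds a first-occurrence index of l2 once and binary-searches each query in the sorted distinct values (tie between the two neighbours resolved by first occurrence in l2), instead of A's linear scan of l2 for every query.
import Mathlib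
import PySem

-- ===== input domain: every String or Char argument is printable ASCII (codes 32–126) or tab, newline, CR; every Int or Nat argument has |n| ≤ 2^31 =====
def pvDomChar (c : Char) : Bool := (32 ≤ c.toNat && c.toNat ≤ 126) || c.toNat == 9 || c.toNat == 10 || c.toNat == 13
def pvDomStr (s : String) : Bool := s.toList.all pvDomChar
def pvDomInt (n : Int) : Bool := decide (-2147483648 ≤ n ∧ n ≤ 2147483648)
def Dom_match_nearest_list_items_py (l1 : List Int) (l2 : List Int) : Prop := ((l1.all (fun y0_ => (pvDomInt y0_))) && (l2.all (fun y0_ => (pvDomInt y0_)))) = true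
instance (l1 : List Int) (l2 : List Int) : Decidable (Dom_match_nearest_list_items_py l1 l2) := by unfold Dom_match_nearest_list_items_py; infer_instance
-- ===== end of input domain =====

-- B replaces A's linear scan of l2 per query by a one-time first-occurrence index plus
-- binary search in the sorted distinct values of l2 (objective: faster).

-- ===== PORT A =====
-- nearest_int_in_list: res = l[0], then a scan keeping any strictly closer element.
-- l[0] on empty l raises IndexError (excluded by Pre_); `headD 0` is never observed there.
-- Python's `abs(i - value) < abs(res - value)` on ints is ported as the equivalent
-- Int.natAbs comparison.
def pvNearestA (value : Int) (l : List Int) : Int :=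
  l.foldl (fun res i => if (i - value).natAbs < (res - value).natAbs then i else res)
    (l.headD 0)

-- for i in range(0, len(l1)): l3.append(nearest_int_in_list(l1[i], l2))
def match_nearest_list_items_py (l1 : List Int) (l2 : List Int) : List Int :=
  l1.foldl (fun l3 v => l3 ++ [pvNearestA v l2]) []

-- ===== PORT B =====
-- first = {}; for i, v in enumerate(l2): if v not in first: first[v] = i
def pvFirstB (l2 : List Int) : PySem.Dict Int Int :=
  (PySem.List.enumerate l2 0).foldl
    (fun d p => if d.contains p.2 then d else d.insert p.2 p.1) PySem.Dict.empty

-- while lo < hi: mid = (lo + hi) // 2; if vals[mid] < x: lo = mid + 1 else: hi = mid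
-- (mid is inlined; indices stay in [0, len(vals)], so Nat `getD` matches Python's
-- in-range indexing; the structurally decreasing fuel = hi - lo only makes the while
-- loop total — each iteration shrinks hi - lo by at least 1, so it is never exhausted)
def pvBisectGo (vals : List Int) (x : Int) : Nat → Nat → Nat → Nat
  | 0, lo, _ => lo
  | fuel + 1, lo, hi =>
    if lo < hi then
      if vals.getD ((lo + hi) / 2) 0 < x then pvBisectGo vals x fuel ((lo + hi) / 2 + 1) hi
      else pvBisectGo vals x fuel lo ((lo + hi) / 2)
    else lo

def pvBisectB (vals : List Int) (x : Int) (lo hi : Nat) : Nat :=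
  pvBisectGo vals x (hi - lo) lo hi

-- query(x): candidates vals[lo-1] / vals[lo]; distance tie broken by first-occurrence index
def pvQueryB (vals : List Int) (first : PySem.Dict Int Int) (x : Int) : Int :=
  let lo := pvBisectB vals x 0 vals.length
  if lo = vals.length then vals.getD (vals.length - 1) 0   -- vals[-1]
  else if lo = 0 then vals.getD 0 0
  else
    let hv := vals.getD lo 0
    let lv := vals.getD (lo - 1) 0
    let dl := x - lv
    let dh := hv - x
    if dl < dh then lv
    else if dh < dl then hv
    else if first.getD lv 0 < first.getD hv 0 then lv else hv

def match_nearest_list_items_py_alt (l1 : List Int) (l2 : List Int) : List Int :=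
  if l1 = [] then []
  else
    let first := pvFirstB l2
    let vals := PySem.List.sorted first.keys (fun v => v) false
    l1.map (pvQueryB vals first)

-- ===== PRECONDITION & SPEC =====
-- A raises IndexError (l[0] with l2 empty) exactly when l1 ≠ [] and l2 = [];
-- Pre_ excludes only those inputs.
def Pre_match_nearest_list_items_py (l1 : List Int) (l2 : List Int) : Prop :=
  l1 = [] ∨ l2 ≠ []
instance (l1 : List Int) (l2 : List Int) : Decidable (Pre_match_nearest_list_items_py l1 l2) := by
  unfold Pre_match_nearest_list_items_py; infer_instance

def pvWitness_match_nearest_list_items_py : List Int × List Int := ([1, 5], [2, 4, 2])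

def Spec_match_nearest_list_items_py (l1 : List Int) (l2 : List Int) (out : List Int) : Prop :=
  out = match_nearest_list_items_py_alt l1 l2
instance (l1 : List Int) (l2 : List Int) (out : List Int) : Decidable (Spec_match_nearest_list_items_py l1 l2 out) := by
  unfold Spec_match_nearest_list_items_py; infer_instance

-- ===== CLAIM (what is proved, stated in full; the proofs are below) =====
def Claim_equal_match_nearest_list_items_py : Prop :=
  ∀ (l1 : List Int) (l2 : List Int), Dom_match_nearest_list_items_py l1 l2 →
    Pre_match_nearest_list_items_py l1 l2 →
    Spec_match_nearest_list_items_py l1 l2 (match_nearest_list_items_py l1 l2)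

-- ===== LEMMAS AND PROOFS =====

-- distance of a candidate v to the query x
def pvDd (x v : Int) : Nat := (v - x).natAbs

-- "v is the first element of l attaining the minimal distance to x"
def pvNst (x : Int) (l : List Int) (v : Int) : Prop :=
  v ∈ l ∧ ∀ w ∈ l, pvDd x v < pvDd x w ∨ (pvDd x v = pvDd x w ∧ l.idxOf v ≤ l.idxOf w)

lemma pvNst_unique {x : Int} {l : List Int} {v w : Int}
    (hv : pvNst x l v) (hw : pvNst x l w) : v = w := by
  obtain ⟨hvm, hvall⟩ := hv
  obtain ⟨hwm, hwall⟩ := hw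
  have h1 := hvall w hwm
  have h2 := hwall v hvm
  have hidx : l.idxOf v = l.idxOf w := by omega
  have h3 : l.idxOf v < l.length := List.idxOf_lt_length_of_mem hvm
  have h4 : l.idxOf w < l.length := List.idxOf_lt_length_of_mem hwm
  rw [← List.getElem_idxOf h3, ← List.getElem_idxOf h4]
  simp [hidx]

-- the first minimum of a nonempty list, as a structural recursion
def pvFirstMin (x : Int) : List Int → Int
  | [] => 0
  | [a] => a
  | a :: b :: l =>
      let m := pvFirstMin x (b :: l)
      if pvDd x a ≤ pvDd x m then a else m

lemma pvFoldA (x : Int) :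
    ∀ (l : List Int) (acc : Int),
      l.foldl (fun res i => if (i - x).natAbs < (res - x).natAbs then i else res) acc
        = pvFirstMin x (acc :: l) := by
  intro l
  induction l with
  | nil => intro acc; simp [pvFirstMin]
  | cons e l ih =>
    intro acc
    rw [List.foldl_cons, ih]
    show pvFirstMin x ((if pvDd x e < pvDd x acc then e else acc) :: l)
        = pvFirstMin x (acc :: e :: l)
    cases l with
    | nil => simp only [pvFirstMin]; split_ifs <;> first | rfl | omega
    | cons c l' =>
      simp only [pvFirstMin]
      split_ifs <;> first | rfl | omega

lemma pvNst_firstMin (x : Int) :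
    ∀ (l : List Int), l ≠ [] → pvNst x l (pvFirstMin x l) := by
  intro l
  induction l with
  | nil => intro h; exact absurd rfl h
  | cons a t ih =>
    intro _
    cases t with
    | nil =>
      refine ⟨by simp [pvFirstMin], ?_⟩
      intro w hw
      simp only [List.mem_cons, List.not_mem_nil, or_false] at hw
      subst hw
      simp [pvFirstMin]
    | cons b t' =>
      obtain ⟨hm, hall⟩ := ih (by simp)
      show pvNst x (a :: b :: t') (if pvDd x a ≤ pvDd x (pvFirstMin x (b :: t')) then a
        else pvFirstMin x (b :: t'))
      set m := pvFirstMin x (b :: t') with hmdef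
      by_cases hc : pvDd x a ≤ pvDd x m
      · rw [if_pos hc]
        refine ⟨List.mem_cons_self, ?_⟩
        intro w hw
        rcases List.mem_cons.mp hw with hwa | hwt
        · subst hwa; right; exact ⟨rfl, le_refl _⟩
        · have := hall w hwt
          by_cases hlt : pvDd x a < pvDd x w
          · exact Or.inl hlt
          · right
            refine ⟨by omega, ?_⟩
            rw [List.idxOf_cons_self]
            omega
      · rw [if_neg hc]
        refine ⟨List.mem_cons_of_mem _ hm, ?_⟩
        intro w hw
        have hma : m ≠ a := by intro h; rw [h] at hc; omega
        rcases List.mem_cons.mp hw with hwa | hwt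
        · subst hwa; left; omega
        · rcases hall w hwt with hlt | ⟨heq, hle⟩
          · exact Or.inl hlt
          · by_cases hwa : w = a
            · subst hwa; left; omega
            · right
              refine ⟨heq, ?_⟩
              rw [List.idxOf_cons_ne _ (Ne.symm hma), List.idxOf_cons_ne _ (Ne.symm hwa)]
              omega

lemma pvNearestA_eq_firstMin (x : Int) (l : List Int) (h : l ≠ []) :
    pvNearestA x l = pvFirstMin x l := by
  cases l with
  | nil => exact absurd rfl h
  | cons hd t =>
    simp only [pvNearestA, List.headD_cons, List.foldl_cons]
    rw [if_neg (by omega)]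
    exact pvFoldA x t hd

-- ===== B-side lemmas =====

lemma pvFirstB_get?_gen :
    ∀ (l : List Int) (s : Int) (d : PySem.Dict Int Int) (v : Int),
      ((PySem.List.enumerate l s).foldl
          (fun d p => if d.contains p.2 then d else d.insert p.2 p.1) d).get? v
        = match d.get? v with
          | some i => some i
          | none => if v ∈ l then some (s + (l.idxOf v : Int)) else none := by
  intro l
  induction l with
  | nil =>
    intro s d v
    simp only [PySem.List.enumerate_nil, List.foldl_nil, List.not_mem_nil, if_false]
    cases d.get? v <;> rfl
  | cons a t ih =>
    intro s d v
    rw [PySem.List.enumerate_cons, List.foldl_cons]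
    rw [ih]
    by_cases hda : d.contains a = true
    · rw [if_pos hda]
      rw [PySem.Dict.contains_eq_isSome_get?] at hda
      by_cases hva : v = a
      · subst hva
        cases hg : d.get? v with
        | none => rw [hg] at hda; simp at hda
        | some i => simp
      · cases hg : d.get? v with
        | some i => simp
        | none =>
          simp only
          by_cases hvt : v ∈ t
          · rw [if_pos hvt, if_pos (List.mem_cons_of_mem _ hvt),
              List.idxOf_cons_ne _ (Ne.symm hva)]
            push_cast; ring_nf
          · rw [if_neg hvt, if_neg (by simp [hva, hvt])]
    · rw [if_neg (by simp [hda])]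
      rw [PySem.Dict.contains_eq_isSome_get?] at hda
      have hdanone : d.get? a = none := by
        cases hg : d.get? a with
        | none => rfl
        | some i => rw [hg] at hda; simp at hda
      by_cases hva : v = a
      · subst hva
        rw [PySem.Dict.get?_insert_self, hdanone]
        simp [List.idxOf_cons_self]
      · rw [PySem.Dict.get?_insert_of_ne d (s, a).1 hva]
        cases hg : d.get? v with
        | some i => simp
        | none =>
          simp only
          by_cases hvt : v ∈ t
          · rw [if_pos hvt, if_pos (List.mem_cons_of_mem _ hvt),
              List.idxOf_cons_ne _ (Ne.symm hva)]
            push_cast; ring_nf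
          · rw [if_neg hvt, if_neg (by simp [hva, hvt])]

lemma pvFirstB_get? (l2 : List Int) (v : Int) :
    (pvFirstB l2).get? v = if v ∈ l2 then some ((l2.idxOf v : Int)) else none := by
  unfold pvFirstB
  rw [pvFirstB_get?_gen l2 0 PySem.Dict.empty v, PySem.Dict.get?_empty]
  simp

lemma pvFirstB_getD (l2 : List Int) (v : Int) (h : v ∈ l2) :
    (pvFirstB l2).getD v 0 = (l2.idxOf v : Int) := by
  rw [PySem.Dict.getD_eq_get?_getD, pvFirstB_get?, if_pos h]
  rfl

lemma pvFirstB_mem_keys (l2 : List Int) (v : Int) :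
    v ∈ (pvFirstB l2).keys ↔ v ∈ l2 := by
  rw [← not_iff_not, ← PySem.Dict.get?_eq_none_iff_not_mem_keys, pvFirstB_get?]
  by_cases h : v ∈ l2 <;> simp [h]

lemma pvNodupFold :
    ∀ (ps : List (Int × Int)) (d : PySem.Dict Int Int), d.keys.Nodup →
      (ps.foldl (fun d p => if d.contains p.2 then d else d.insert p.2 p.1) d).keys.Nodup := by
  intro ps
  induction ps with
  | nil => intro d h; exact h
  | cons p t ih =>
    intro d h
    rw [List.foldl_cons]
    apply ih
    split_ifs with hc
    · exact h
    · exact PySem.Dict.nodup_keys_insert d p.2 p.1 h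

lemma pvFirstB_nodup_keys (l2 : List Int) : (pvFirstB l2).keys.Nodup :=
  pvNodupFold _ _ PySem.Dict.nodup_keys_empty

lemma pvVals_pairwise (l2 : List Int) :
    (PySem.List.sorted (pvFirstB l2).keys (fun v => v) false).Pairwise (· < ·) := by
  have h1 := PySem.List.sorted_pairwise (pvFirstB l2).keys (fun v => v)
  have h2 : (PySem.List.sorted (pvFirstB l2).keys (fun v => v) false).Nodup :=
    (PySem.List.sorted_perm (pvFirstB l2).keys (fun v => v) false).symm.nodup
      (pvFirstB_nodup_keys l2)
  exact (h1.and h2).imp (fun ⟨a, b⟩ => lt_of_le_of_ne a b)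

-- binary-search invariant: pvBisectB returns the partition point of x in a sorted list
lemma pvBisect_inv (vals : List Int) (x : Int)
    (hmono : ∀ p q : Nat, p ≤ q → q < vals.length → vals.getD p 0 ≤ vals.getD q 0) :
    ∀ (n : Nat), ∀ (lo hi : Nat), hi - lo ≤ n → lo ≤ hi → hi ≤ vals.length →
      (∀ k, k < lo → vals.getD k 0 < x) →
      (∀ k, hi ≤ k → k < vals.length → x ≤ vals.getD k 0) →
      lo ≤ pvBisectGo vals x n lo hi ∧ pvBisectGo vals x n lo hi ≤ hi ∧
      (∀ k, k < pvBisectGo vals x n lo hi → vals.getD k 0 < x) ∧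
      (∀ k, pvBisectGo vals x n lo hi ≤ k → k < vals.length → x ≤ vals.getD k 0) := by
  intro n
  induction n with
  | zero =>
    intro lo hi hn hle hhi hlow hhigh
    have : lo = hi := by omega
    subst this
    exact ⟨le_refl _, le_refl _, hlow, fun k hk hkl => hhigh k hk hkl⟩
  | succ n ih =>
    intro lo hi hn hle hhi hlow hhigh
    rw [pvBisectGo]
    by_cases hlt : lo < hi
    · rw [if_pos hlt]
      by_cases hm : vals.getD ((lo + hi) / 2) 0 < x
      · rw [if_pos hm]
        have hrec := ih ((lo + hi) / 2 + 1) hi (by omega) (by omega) hhi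
          (by
            intro k hk
            exact lt_of_le_of_lt (hmono k ((lo + hi) / 2) (by omega) (by omega)) hm)
          hhigh
        exact ⟨by omega, hrec.2.1, hrec.2.2⟩
      · rw [if_neg hm]
        have hrec := ih lo ((lo + hi) / 2) (by omega) (by omega) (by omega) hlow
          (by
            intro k hk hkl
            exact le_trans (le_of_not_gt hm) (hmono ((lo + hi) / 2) k hk hkl))
        exact ⟨hrec.1, by omega, hrec.2.2⟩
    · rw [if_neg hlt]
      exact ⟨le_refl _, le_of_not_gt (by omega), hlow,
        fun k hk hkl => hhigh k (by omega) hkl⟩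

lemma pvQuery_nst (l2 : List Int) (x : Int) (h2 : l2 ≠ []) :
    pvNst x l2
      (pvQueryB (PySem.List.sorted (pvFirstB l2).keys (fun v => v) false) (pvFirstB l2) x) := by
  set vals := PySem.List.sorted (pvFirstB l2).keys (fun v => v) false with hvalsdef
  have hmemv : ∀ v, v ∈ vals ↔ v ∈ l2 := by
    intro v
    rw [hvalsdef, PySem.List.mem_sorted]
    exact pvFirstB_mem_keys l2 v
  have hpw : vals.Pairwise (· < ·) := pvVals_pairwise l2
  obtain ⟨a0, ha0⟩ := List.exists_mem_of_ne_nil l2 h2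
  have hvne : vals ≠ [] := List.ne_nil_of_mem ((hmemv a0).mpr ha0)
  have hlen : 0 < vals.length := List.length_pos_of_ne_nil hvne
  have hsm : ∀ p q : Nat, p < q → q < vals.length → vals.getD p 0 < vals.getD q 0 := by
    intro p q hpq hq
    rw [List.getD_eq_getElem vals 0 (by omega), List.getD_eq_getElem vals 0 hq]
    exact List.pairwise_iff_getElem.mp hpw p q (by omega) hq hpq
  have hmono : ∀ p q : Nat, p ≤ q → q < vals.length → vals.getD p 0 ≤ vals.getD q 0 := by
    intro p q hpq hq
    rcases Nat.lt_or_ge p q with h | h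
    · exact le_of_lt (hsm p q h hq)
    · have : p = q := by omega
      rw [this]
  obtain ⟨hj0, hjle, hjlow, hjhigh⟩ :=
    pvBisect_inv vals x hmono (vals.length - 0) 0 vals.length (by omega) (by omega)
      (le_refl _) (by omega) (by omega)
  set j := pvBisectGo vals x (vals.length - 0) 0 vals.length with hjdef
  -- membership of a getD element
  have hmem : ∀ k : Nat, k < vals.length → vals.getD k 0 ∈ l2 := by
    intro k hk
    rw [List.getD_eq_getElem vals 0 hk]
    exact (hmemv _).mp (List.getElem_mem hk)
  -- every element of l2 is some vals[k]
  have hrep : ∀ w ∈ l2, ∃ k : Nat, k < vals.length ∧ vals.getD k 0 = w := by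
    intro w hw
    obtain ⟨k, hk, he⟩ := List.mem_iff_getElem.mp ((hmemv w).mpr hw)
    exact ⟨k, hk, by rw [List.getD_eq_getElem vals 0 hk]; exact he⟩
  have hidxlt : ∀ v w : Int, v ∈ l2 → w ∈ l2 →
      ((pvFirstB l2).getD v 0 < (pvFirstB l2).getD w 0 ↔ l2.idxOf v < l2.idxOf w) := by
    intro v w hv hw
    rw [pvFirstB_getD l2 v hv, pvFirstB_getD l2 w hw]
    exact_mod_cast Int.ofNat_lt
  show pvNst x l2 (pvQueryB vals (pvFirstB l2) x)
  simp only [pvQueryB, pvBisectB, ← hjdef]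
  by_cases hjlen : j = vals.length
  · -- all values are < x; the largest (last) value is nearest
    rw [if_pos hjlen]
    set r := vals.getD (vals.length - 1) 0 with hrdef
    have hrmem : r ∈ l2 := hmem _ (by omega)
    have hrx : vals.getD (vals.length - 1) 0 < x := hjlow (vals.length - 1) (by omega)
    refine ⟨hrmem, ?_⟩
    intro w hw
    obtain ⟨k, hk, hkw⟩ := hrep w hw
    have hwx : vals.getD k 0 < x := hjlow k (by omega)
    rcases Nat.lt_or_ge k (vals.length - 1) with hkl | hkl
    · have := hsm k (vals.length - 1) hkl (by omega)
      left; simp only [pvDd]; omega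
    · have : k = vals.length - 1 := by omega
      subst this
      rw [hkw.symm, ← hrdef]
      right; exact ⟨rfl, le_refl _⟩
  · rw [if_neg hjlen]
    by_cases hjz : j = 0
    · -- x ≤ all values; the smallest (first) value is nearest
      rw [if_pos hjz]
      set r := vals.getD 0 0 with hrdef
      have hrmem : r ∈ l2 := hmem 0 hlen
      refine ⟨hrmem, ?_⟩
      intro w hw
      obtain ⟨k, hk, hkw⟩ := hrep w hw
      have hwx : x ≤ vals.getD k 0 := hjhigh k (by omega) hk
      rcases Nat.lt_or_ge 0 k with hkl | hkl
      · have := hsm 0 k hkl hk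
        have hrx : x ≤ r := hjhigh 0 (by omega) hlen
        left; simp only [pvDd]; omega
      · have : k = 0 := by omega
        subst this
        rw [hkw.symm, ← hrdef]
        right; exact ⟨rfl, le_refl _⟩
    · rw [if_neg hjz]
      have hjlt : j < vals.length := by omega
      have hjpos : 0 < j := by omega
      set hv := vals.getD j 0 with hhvdef
      set lv := vals.getD (j - 1) 0 with hlvdef
      have hlvx : lv < x := hjlow (j - 1) (by omega)
      have hxhv : x ≤ hv := hjhigh j (le_refl _) hjlt
      have hlvm : lv ∈ l2 := hmem _ (by omega)
      have hhvm : hv ∈ l2 := hmem _ hjlt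
      have hlvhv : lv < hv := hsm (j - 1) j (by omega) hjlt
      -- distances of an arbitrary element w = vals[k]
      have hside : ∀ k : Nat, k < vals.length →
          (k = j - 1 ∨ k = j) ∨
          ((x - lv ≤ hv - x → pvDd x lv < pvDd x (vals.getD k 0)) ∧
           (hv - x ≤ x - lv → pvDd x hv < pvDd x (vals.getD k 0))) := by
        intro k hk
        rcases Nat.lt_or_ge k j with hkj | hkj
        · rcases Nat.lt_or_ge k (j - 1) with hkj1 | hkj1
          · have h1 := hsm k (j - 1) hkj1 (by omega)
            have h2 := hjlow k (by omega)
            refine Or.inr ⟨?_, ?_⟩ <;> (intro hh; simp only [pvDd]; omega)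
          · left; left; omega
        · rcases Nat.lt_or_ge j k with hkj2 | hkj2
          · have h1 := hsm j k hkj2 hk
            have h2 := hjhigh k (by omega) hk
            refine Or.inr ⟨?_, ?_⟩ <;> (intro hh; simp only [pvDd]; omega)
          · left; right; omega
      by_cases hdl : x - lv < hv - x
      · rw [if_pos hdl]
        refine ⟨hlvm, ?_⟩
        intro w hw
        obtain ⟨k, hk, hkw⟩ := hrep w hw
        rcases hside k hk with (hk1 | hk1) | ⟨hd1, _⟩
        · subst hk1; rw [← hkw, ← hlvdef]; right; exact ⟨rfl, le_refl _⟩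
        · subst hk1; rw [← hkw, ← hhvdef]; left; simp only [pvDd]; omega
        · left; rw [← hkw]; exact hd1 (by omega)
      · rw [if_neg hdl]
        by_cases hdh : hv - x < x - lv
        · rw [if_pos hdh]
          refine ⟨hhvm, ?_⟩
          intro w hw
          obtain ⟨k, hk, hkw⟩ := hrep w hw
          rcases hside k hk with (hk1 | hk1) | ⟨_, hd2⟩
          · subst hk1; rw [← hkw, ← hlvdef]; left; simp only [pvDd]; omega
          · subst hk1; rw [← hkw, ← hhvdef]; right; exact ⟨rfl, le_refl _⟩
          · left; rw [← hkw]; exact hd2 (by omega)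
        · -- exact tie: x - lv = hv - x; the value occurring first in l2 wins
          rw [if_neg hdh]
          have htie : x - lv = hv - x := by omega
          have hddeq : pvDd x lv = pvDd x hv := by simp only [pvDd]; omega
          by_cases hfi : (pvFirstB l2).getD lv 0 < (pvFirstB l2).getD hv 0
          · rw [if_pos hfi]
            have hio : l2.idxOf lv < l2.idxOf hv := (hidxlt lv hv hlvm hhvm).mp hfi
            refine ⟨hlvm, ?_⟩
            intro w hw
            obtain ⟨k, hk, hkw⟩ := hrep w hw
            rcases hside k hk with (hk1 | hk1) | ⟨hd1, _⟩
            · subst hk1; rw [← hkw, ← hlvdef]; right; exact ⟨rfl, le_refl _⟩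
            · subst hk1; rw [← hkw, ← hhvdef]; right; exact ⟨hddeq, by omega⟩
            · left; rw [← hkw]; exact hd1 (by omega)
          · rw [if_neg hfi]
            have hio : l2.idxOf hv ≤ l2.idxOf lv := by
              rw [pvFirstB_getD l2 lv hlvm, pvFirstB_getD l2 hv hhvm] at hfi
              omega
            refine ⟨hhvm, ?_⟩
            intro w hw
            obtain ⟨k, hk, hkw⟩ := hrep w hw
            rcases hside k hk with (hk1 | hk1) | ⟨_, hd2⟩
            · subst hk1; rw [← hkw, ← hlvdef]; right; exact ⟨hddeq.symm, hio⟩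
            · subst hk1; rw [← hkw, ← hhvdef]; right; exact ⟨rfl, le_refl _⟩
            · left; rw [← hkw]; exact hd2 (by omega)

lemma pvFoldAppend (f : Int → Int) :
    ∀ (l : List Int) (acc : List Int),
      l.foldl (fun a v => a ++ [f v]) acc = acc ++ l.map f := by
  intro l
  induction l with
  | nil => intro acc; simp
  | cons a t ih => intro acc; simp [ih]

-- ===== VERDICT (by name: the statement is the Claim_ definition above) =====
theorem match_nearest_list_items_py_spec : Claim_equal_match_nearest_list_items_py := by
  intro l1 l2 _ hpre
  unfold Spec_match_nearest_list_items_py match_nearest_list_items_py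
    match_nearest_list_items_py_alt
  by_cases h1 : l1 = []
  · subst h1; simp
  · rw [if_neg h1]
    have h2 : l2 ≠ [] := by
      rcases hpre with h | h
      · exact absurd h h1
      · exact h
    rw [pvFoldAppend]
    show [] ++ l1.map (fun v => pvNearestA v l2)
        = l1.map (pvQueryB (PySem.List.sorted (pvFirstB l2).keys (fun v => v) false)
            (pvFirstB l2))
    rw [List.nil_append]
    apply List.map_eq_map_iff.mpr
    intro x _
    rw [pvNearestA_eq_firstMin x l2 h2]
    exact pvNst_unique (pvNst_firstMin x l2 h2) (pvQuery_nst l2 x h2)
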